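-- pv_equiv track=rewrite | github.com/alexgorji/musurgia | musurgia/utils.py | transpose_3d_diagonally
-- ===== SOURCE A (Python) =====
-- def transpose_3d_diagonally(matrix):
--     """
--     :param matrix:
--     :return:
--
--     >>> m = [[('a1', 'b1', 'c1'), ('d1', 'e1', 'f1'), ('g1', 'h1', 'i1')], [('a2', 'b2', 'c2'), ('d2', 'e2', 'f2'), ('g2', 'h2', 'i2')], [('a3', 'b3', 'c3'), ('d3', 'e3', 'f3'), ('g3', 'h3', 'i3')]]
--     >>> pprint(m)
--     [[('a1', 'b1', 'c1'), ('d1', 'e1', 'f1'), ('g1', 'h1', 'i1')],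
--      [('a2', 'b2', 'c2'), ('d2', 'e2', 'f2'), ('g2', 'h2', 'i2')],
--      [('a3', 'b3', 'c3'), ('d3', 'e3', 'f3'), ('g3', 'h3', 'i3')]]
--     >>> pprint(transpose_3d_diagonally(m))
--     [[('a1', 'b2', 'c3'), ('b1', 'c2', 'd3'), ('c1', 'd2', 'e3')],
--      [('d1', 'e2', 'f3'), ('e1', 'f2', 'g3'), ('f1', 'g2', 'h3')],
--      [('g1', 'h2', 'i3'), ('h1', 'i2', 'a3'), ('i1', 'a2', 'b3')]]
--     """
--
--     output = []
--     for i in range(len(matrix)):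
--         row_list = []
--         for j in range(len(matrix)):
--             tmp = []
--             for k in range(len(matrix)):
--                 row = k
--                 column = (i + (j + k) // len(matrix)) % len(matrix)
--                 element = (j + k) % len(matrix)
--                 tmp.append(matrix[row][column][element])
--             row_list.append(tuple(tmp))
--         output.append(row_list)
--     return output
-- ===== SOURCE B (Python) =====
-- def transpose_3d_diagonally(matrix):
--     n = len(matrix)
--     flats = [[cell[e] for cell in layer[:n] for e in range(n)] for layer in matrix]
--     nn = n * n
--     return [[tuple(flats[k][(i * n + j + k) % nn] for k in range(n))
--              for j in range(n)]
--             for i in range(n)]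
-- ===== Notes on version B (the rewrite author's own statement) =====
-- stated objective: alternative
-- what changed: A derives each element with a per-element carry computation (i+(j+k)//n)%n over rows and columns; B flattens each layer once into a length-n*n list and reads the diagonal with a single modular index (i*n+j+k) % (n*n).
import Mathlib
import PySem

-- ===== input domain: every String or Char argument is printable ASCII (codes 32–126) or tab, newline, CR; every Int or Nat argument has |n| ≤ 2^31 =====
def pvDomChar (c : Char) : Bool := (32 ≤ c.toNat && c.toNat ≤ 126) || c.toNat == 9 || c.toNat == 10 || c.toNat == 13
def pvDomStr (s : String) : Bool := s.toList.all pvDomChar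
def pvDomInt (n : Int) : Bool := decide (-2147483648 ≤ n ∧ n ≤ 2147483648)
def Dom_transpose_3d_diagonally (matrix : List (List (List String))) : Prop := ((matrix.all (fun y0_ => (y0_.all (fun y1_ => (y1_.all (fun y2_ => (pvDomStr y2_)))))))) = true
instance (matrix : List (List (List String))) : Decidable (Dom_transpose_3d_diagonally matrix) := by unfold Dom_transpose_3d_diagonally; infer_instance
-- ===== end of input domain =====

-- B replaces A's per-element div/mod index derivation by flattening each layer once and
-- reading it with a single modular index (alternative decomposition; same asymptotic cost).

-- ===== PORT A =====
-- literal port of A: three nested loops appending, element = matrix[k][(i+(j+k)//n)%n][(j+k)%n]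
def transpose_3d_diagonally (matrix : List (List (List String))) : List (List (List String)) :=
  let n : Int := matrix.length
  (PySem.List.pyRange 0 n 1).foldl (fun output i =>
    output ++ [(PySem.List.pyRange 0 n 1).foldl (fun row_list j =>
      row_list ++ [(PySem.List.pyRange 0 n 1).foldl (fun tmp k =>
        tmp ++ [PySem.List.pyGetD
                  (PySem.List.pyGetD
                    (PySem.List.pyGetD matrix k [])
                    (PySem.Int.mod (i + PySem.Int.floordiv (j + k) n) n) [])
                  (PySem.Int.mod (j + k) n) ""]) []]) []]) []

-- ===== PORT B =====
-- literal port of Source B: flats[k] = [cell[e] for cell in matrix[k][:n] for e in range(n)];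
-- output[i][j][k] = flats[k][(i*n + j + k) % (n*n)]
def transpose_3d_diagonally_alt (matrix : List (List (List String))) : List (List (List String)) :=
  let n : Int := matrix.length
  let flats : List (List String) := matrix.map (fun layer =>
    (PySem.List.slice layer none (some n)).flatMap (fun cell =>
      (PySem.List.pyRange 0 n 1).map (fun e => PySem.List.pyGetD cell e "")))
  let nn : Int := n * n
  (PySem.List.pyRange 0 n 1).map (fun i =>
    (PySem.List.pyRange 0 n 1).map (fun j =>
      (PySem.List.pyRange 0 n 1).map (fun k =>
        PySem.List.pyGetD (PySem.List.pyGetD flats k []) (PySem.Int.mod (i * n + j + k) nn) "")))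

-- ===== PRECONDITION & SPEC =====
-- Pre_: exactly the inputs where A's indexing never raises IndexError — every row has at
-- least n = len(matrix) cells and each of the first n cells of a row has length ≥ n.
def Pre_transpose_3d_diagonally (matrix : List (List (List String))) : Prop :=
  ∀ row ∈ matrix, matrix.length ≤ row.length ∧
    ∀ cell ∈ row.take matrix.length, matrix.length ≤ cell.length
instance (matrix : List (List (List String))) : Decidable (Pre_transpose_3d_diagonally matrix) := by
  unfold Pre_transpose_3d_diagonally; infer_instance
def pvWitness_transpose_3d_diagonally : List (List (List String)) := [[["a"]]]

def Spec_transpose_3d_diagonally (matrix : List (List (List String))) (out : List (List (List String))) : Prop := out = transpose_3d_diagonally_alt matrix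
instance (matrix : List (List (List String))) (out : List (List (List String))) : Decidable (Spec_transpose_3d_diagonally matrix out) := by unfold Spec_transpose_3d_diagonally; infer_instance

-- ===== CLAIM (what is proved, stated in full; the proofs are below) =====
def Claim_equal_transpose_3d_diagonally : Prop := ∀ (matrix : List (List (List String))), Dom_transpose_3d_diagonally matrix → Pre_transpose_3d_diagonally matrix → Spec_transpose_3d_diagonally matrix (transpose_3d_diagonally matrix)

-- ===== LEMMAS AND PROOFS =====

-- (range n).map (xs.getD · d) recovers xs.take n when n ≤ |xs|
lemma pv_map_range_getD {α : Type} (xs : List α) (n : Nat) (d : α) (h : n ≤ xs.length) :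
    (List.range n).map (fun e => xs.getD e d) = xs.take n := by
  apply List.ext_getElem
  · simp; omega
  · intro e h1 h2
    simp only [List.getElem_map, List.getElem_range, List.getElem_take]
    rw [List.getD_eq_getElem _ _ (by simp at h1 ⊢; omega)]

-- getD through take, below the cut
lemma pv_getD_take {α : Type} (xs : List α) (n e : Nat) (d : α) (he : e < n)
    (hn : n ≤ xs.length) : (xs.take n).getD e d = xs.getD e d := by
  rw [List.getD_eq_getElem _ _ (by simp; omega), List.getD_eq_getElem _ _ (by omega),
      List.getElem_take]

-- indexing a flatMap of equal-length blocks
lemma pv_flatMap_getD {α : Type} (f : List α → List α) (L : List (List α)) (nb : Nat)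
    (d : α) (hf : ∀ x ∈ L, (f x).length = nb) (c e : Nat) (hc : c < L.length) (he : e < nb) :
    (L.flatMap f).getD (c * nb + e) d = (f (L.getD c [])).getD e d := by
  induction L generalizing c with
  | nil => simp at hc
  | cons x xs ih =>
    cases c with
    | zero =>
      have hx : (f x).length = nb := hf x (by simp)
      simp only [List.flatMap_cons, List.getD_cons_zero, Nat.zero_mul, Nat.zero_add]
      rw [List.getD_eq_getElem _ _ (by simp [hx]; omega),
          List.getD_eq_getElem _ _ (by omega), List.getElem_append_left]
    | succ c =>
      have hx : (f x).length = nb := hf x (by simp)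
      have hrec := ih (fun y hy => hf y (by simp [hy])) c (by simp at hc; omega)
      simp only [List.flatMap_cons, List.getD_cons_succ]
      rw [← hrec]
      have harith : (c + 1) * nb + e = (f x).length + (c * nb + e) := by rw [hx]; ring
      rw [harith]
      rcases Nat.lt_or_ge (c * nb + e) (xs.flatMap f).length with hlt | hge
      · rw [List.getD_eq_getElem _ _ (by simp only [List.length_append]; omega),
            List.getD_eq_getElem _ _ hlt, List.getElem_append_right (by omega)]
        congr 1; omega
      · rw [List.getD_eq_default _ _ (by simp only [List.length_append]; omega),
            List.getD_eq_default _ _ (by omega)]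

-- the single modular index of B equals A's (column, element) pair linearised
lemma pv_arith (n i j k : Nat) (hi : i < n) (hj : j < n) (hk : k < n) :
    (i * n + j + k) % (n * n) = ((i + (j + k) / n) % n) * n + (j + k) % n := by
  have hn : 0 < n := by omega
  rcases Nat.lt_or_ge (j + k) n with hs | hs
  · -- no carry
    have h1 : (j + k) / n = 0 := Nat.div_eq_of_lt hs
    have h2 : (j + k) % n = j + k := Nat.mod_eq_of_lt hs
    have h3 : (i + 0) % n = i := by rw [Nat.add_zero]; exact Nat.mod_eq_of_lt hi
    have h4 : i * n + j + k < n * n := by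
      have : (i + 1) * n ≤ n * n := Nat.mul_le_mul_right n (by omega)
      nlinarith
    rw [h1, h2, h3, Nat.mod_eq_of_lt h4]; omega
  · -- carry 1
    have hs2 : j + k < 2 * n := by omega
    have h1 : (j + k) / n = 1 := Nat.div_eq_of_lt_le (by omega) (by omega)
    have h2 : (j + k) % n = j + k - n := by
      rw [Nat.mod_eq_sub_mod hs, Nat.mod_eq_of_lt (by omega)]
    rcases Nat.lt_or_ge (i + 1) n with hi1 | hi1
    · have h3 : (i + 1) % n = i + 1 := Nat.mod_eq_of_lt hi1
      have h4 : i * n + j + k < n * n := by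
        have : (i + 2) * n ≤ n * n := Nat.mul_le_mul_right n (by omega)
        nlinarith
      rw [h1, h3, Nat.mod_eq_of_lt h4, h2]; ring_nf; omega
    · have hieq : i + 1 = n := by omega
      have h3 : (i + 1) % n = 0 := by rw [hieq, Nat.mod_self]
      have h5 : i * n + j + k = n * n + (j + k - n) := by
        have : i * n + n = n * n := by nlinarith [hieq]
        omega
      rw [h1, h3, h5, Nat.add_mod_left, Nat.mod_eq_of_lt (by nlinarith), h2]
      omega

-- B's flats[k] is the layer flattened blockwise, under the length precondition
lemma pv_flat_eq (layer : List (List String)) (n : Nat)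
    (hlen : ∀ cell ∈ layer.take n, n ≤ cell.length) :
    (PySem.List.slice layer none (some (n : Int))).flatMap
        (fun cell => (PySem.List.pyRange 0 (n : Int) 1).map
          (fun e => PySem.List.pyGetD cell e "")) =
      (layer.take n).flatMap (fun cell => cell.take n) := by
  rw [PySem.List.slice_to_natCast]
  apply List.flatMap_congr
  intro cell hcell
  rw [PySem.List.pyRange_zero_natCast, List.map_map]
  have : ((fun e => PySem.List.pyGetD cell e "") ∘ fun (k : Nat) => (k : Int)) =
      (fun e : Nat => cell.getD e "") := by
    funext e; simp [PySem.List.pyGetD_natCast]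
  rw [this, pv_map_range_getD cell n "" (hlen cell hcell)]

-- pointwise agreement of the two element formulas
lemma pv_pointwise (matrix : List (List (List String)))
    (hpre : Pre_transpose_3d_diagonally matrix) (i j k : Nat)
    (hi : i < matrix.length) (hj : j < matrix.length) (hk : k < matrix.length) :
    PySem.List.pyGetD
      (PySem.List.pyGetD (PySem.List.pyGetD matrix (k : Int) [])
        (PySem.Int.mod ((i : Int) + PySem.Int.floordiv ((j : Int) + (k : Int)) matrix.length)
          matrix.length) [])
      (PySem.Int.mod ((j : Int) + (k : Int)) matrix.length) "" =
    PySem.List.pyGetD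
      (PySem.List.pyGetD
        (matrix.map (fun layer =>
          (PySem.List.slice layer none (some (matrix.length : Int))).flatMap
            (fun cell => (PySem.List.pyRange 0 (matrix.length : Int) 1).map
              (fun e => PySem.List.pyGetD cell e "")))) (k : Int) [])
      (PySem.Int.mod ((i : Int) * matrix.length + (j : Int) + (k : Int))
        ((matrix.length : Int) * matrix.length)) "" := by
  set n := matrix.length with hn
  have hn0 : 0 < n := by omega
  -- normalise all Int arithmetic to Nat casts
  have e1 : ((j : Int) + (k : Int)) = ((j + k : Nat) : Int) := by push_cast; ring
  have e2 : ((i : Int) * n + (j : Int) + (k : Int)) = ((i * n + j + k : Nat) : Int) := by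
    push_cast; ring
  have e3 : ((n : Int) * n) = ((n * n : Nat) : Int) := by push_cast; ring
  rw [e1, e2, e3, PySem.Int.floordiv_natCast, PySem.Int.mod_natCast, PySem.Int.mod_natCast]
  have e4 : ((i : Int) + ((j + k) / n : Nat)) = ((i + (j + k) / n : Nat) : Int) := by
    push_cast; ring
  rw [e4, PySem.Int.mod_natCast]
  simp only [PySem.List.pyGetD_natCast]
  -- name the layer and its facts
  have hmem : matrix.getD k [] ∈ matrix := by
    rw [List.getD_eq_getElem _ _ hk]; exact List.getElem_mem hk
  obtain ⟨hrow, hcells⟩ := hpre _ hmem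
  set layer := matrix.getD k [] with hlay
  set c := (i + (j + k) / n) % n with hc
  set e := (j + k) % n with he
  have hcn : c < n := Nat.mod_lt _ hn0
  have hen : e < n := Nat.mod_lt _ hn0
  -- right-hand side: map-getD, flats, flatMap indexing
  have hmap : (matrix.map (fun layer =>
      (PySem.List.slice layer none (some (n : Int))).flatMap
        (fun cell => (PySem.List.pyRange 0 (n : Int) 1).map
          (fun e => PySem.List.pyGetD cell e "")))).getD k [] =
      (PySem.List.slice layer none (some (n : Int))).flatMap
        (fun cell => (PySem.List.pyRange 0 (n : Int) 1).map
          (fun e => PySem.List.pyGetD cell e "")) := by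
    rw [List.getD_eq_getElem _ _ (by simpa using hk), List.getElem_map, hlay,
        List.getD_eq_getElem _ _ hk]
  rw [hmap,
      pv_flat_eq layer n hcells, pv_arith n i j k hi hj hk,
      pv_flatMap_getD (fun cell => cell.take n) (layer.take n) n ""
        (fun x hx => by have := hcells x hx; simp only [List.length_take]; omega)
        c e (by simp [List.length_take]; omega) hen,
      pv_getD_take layer n c [] hcn hrow]
  rw [pv_getD_take (layer.getD c []) n e "" hen
      (hcells (layer.getD c []) (by
        rw [List.getD_eq_getElem _ _ (by omega : c < layer.length)]
        exact List.mem_take_iff_getElem.mpr ⟨c, by omega, rfl⟩))]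

-- ===== VERDICT (by name: the statement is the Claim_ definition above) =====
theorem transpose_3d_diagonally_spec : Claim_equal_transpose_3d_diagonally := by
  intro matrix _ hpre
  unfold Spec_transpose_3d_diagonally transpose_3d_diagonally transpose_3d_diagonally_alt
  simp only [PySem.List.foldl_append_singleton_eq_map, List.nil_append]
  apply List.map_congr_left
  intro i hi
  rw [PySem.List.mem_pyRange_one] at hi
  apply List.map_congr_left
  intro j hj
  rw [PySem.List.mem_pyRange_one] at hj
  apply List.map_congr_left
  intro k hk
  rw [PySem.List.mem_pyRange_one] at hk
  have ei : i = ((i.toNat : Nat) : Int) := by omega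
  have ej : j = ((j.toNat : Nat) : Int) := by omega
  have ek : k = ((k.toNat : Nat) : Int) := by omega
  rw [ei, ej, ek]
  exact pv_pointwise matrix hpre i.toNat j.toNat k.toNat (by omega) (by omega) (by omega)
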